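-- pv_equiv track=rewrite | github.com/sbergeron42/ssbu-decomp | tools/fuzz_flags.py | extract_short_name
-- ===== SOURCE A (Python) =====
-- def extract_short_name(mangled):
--     if not mangled.startswith('_Z'):
--         return mangled
--     prefix = "_ZN3app8lua_bind"
--     if mangled.startswith(prefix):
--         rest = mangled[len(prefix):]
--         i = 0
--         while i < len(rest) and rest[i].isdigit():
--             i += 1
--         if i > 0:
--             length = int(rest[:i])
--             name = rest[i:i + length]
--             if len(name) == length:
--                 return name
--     if mangled.startswith('_ZN'):
--         rest = mangled[3:]
--         last_name = None
--         while rest and rest[0] != 'E':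
--             i = 0
--             while i < len(rest) and rest[i].isdigit():
--                 i += 1
--             if i == 0:
--                 break
--             length = int(rest[:i])
--             name = rest[i:i + length]
--             if len(name) < length:
--                 break
--             last_name = name
--             rest = rest[i + length:]
--         if last_name:
--             return last_name
--     return mangled
-- ===== SOURCE B (Python) =====
-- def extract_short_name(mangled):
--     if not mangled.startswith('_Z'):
--         return mangled
--     # Index-based single parse (no slicing of a shrinking 'rest'): collect all
--     # length-prefixed segments after '_ZN', then select which one to return.
--     names = []
--     if mangled.startswith('_ZN'):
--         n = len(mangled)
--         p = 3
--         while p < n and mangled[p] != 'E':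
--             q = p
--             while q < n and mangled[q].isdigit():
--                 q += 1
--             if q == p:
--                 break
--             length = int(mangled[p:q])
--             if q + length > n:
--                 break
--             names.append(mangled[q:q + length])
--             p = q + length
--     if mangled.startswith('_ZN3app8lua_bind') and len(names) >= 3:
--         return names[2]
--     if names and names[-1]:
--         return names[-1]
--     return mangled
-- ===== Notes on version B (the rewrite author's own statement) =====
-- stated objective: alternative
-- what changed: A's two separate scans over shrinking slice copies (a one-shot lua_bind parse plus a while loop that reassigns rest = rest[i+length:] and tracks only the last name) are replaced by a single index-based pass over the fixed string that collects every length-prefixed segment into a list, followed by one selection step (third segment for lua_bind symbols, last segment otherwise).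
import Mathlib
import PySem

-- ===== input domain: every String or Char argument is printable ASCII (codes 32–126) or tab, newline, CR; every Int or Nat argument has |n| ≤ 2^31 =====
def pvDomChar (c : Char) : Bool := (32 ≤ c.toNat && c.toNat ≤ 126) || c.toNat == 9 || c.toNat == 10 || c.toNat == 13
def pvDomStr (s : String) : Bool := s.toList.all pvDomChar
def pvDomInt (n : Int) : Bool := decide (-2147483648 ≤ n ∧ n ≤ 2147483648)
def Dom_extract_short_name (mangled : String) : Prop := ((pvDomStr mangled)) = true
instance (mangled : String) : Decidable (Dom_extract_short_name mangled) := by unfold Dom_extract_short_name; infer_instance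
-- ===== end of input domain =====

-- B replaces A's two scans over shrinking slice copies ('rest = rest[i+length:]') by ONE index-based
-- pass over the fixed string collecting every segment, followed by a selection step (alternative).

-- ===== PORT A =====
-- A slices 'rest' repeatedly; its port works on the dropped suffix list, exactly as the Python does.
-- count of leading decimal digits of 'rest' (per-char str.isdigit; exact on the ASCII domain)
def pvCountDigits : List Char → Nat
  | [] => 0
  | c :: cs => if c.isDigit then 1 + pvCountDigits cs else 0

-- int(<nonempty all-digit string>) — exact decimal value (no sign/space/underscore possible here)
def pvDigitsVal (l : List Char) : Nat := l.foldl (fun a c => 10 * a + (c.toNat - 48)) 0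

-- name = rest[i:i+length] with i = the digit count and length = int(rest[:i]) (slice clamps = take)
def pvName (rest : List Char) : List Char :=
  (rest.drop (pvCountDigits rest)).take (pvDigitsVal (rest.take (pvCountDigits rest)))

-- the one-shot parse in A's lua_bind branch: some name = 'return name', none = fall through
def pvAluaParse (rest : List Char) : Option (List Char) :=
  if pvCountDigits rest > 0 then
    if (pvName rest).length = pvDigitsVal (rest.take (pvCountDigits rest)) then some (pvName rest)
    else none
  else none

-- A's general while loop, carrying last_name exactly as the Python does
def pvAloop (rest : List Char) (last_name : Option (List Char)) : Option (List Char) :=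
  match h : rest with
  | [] => last_name
  | c :: _ =>
    if c = 'E' then last_name
    else if pvCountDigits rest = 0 then last_name
    else if (pvName rest).length < pvDigitsVal (rest.take (pvCountDigits rest)) then last_name
    else pvAloop (rest.drop (pvCountDigits rest + pvDigitsVal (rest.take (pvCountDigits rest)))) (some (pvName rest))
termination_by rest.length
decreasing_by subst h; simp [List.length_drop]; omega

def extract_short_name (mangled : String) : String :=
  if ¬ PySem.Str.startswith mangled "_Z" then mangled
  else
    let luaRes : Option (List Char) :=
      if PySem.Str.startswith mangled "_ZN3app8lua_bind" then
        pvAluaParse (mangled.toList.drop 16)   -- mangled[len(prefix):]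
      else none
    match luaRes with
    | some name => String.ofList name
    | none =>
      if PySem.Str.startswith mangled "_ZN" then
        match pvAloop (mangled.toList.drop 3) none with
        | some n => if n ≠ [] then String.ofList n else mangled   -- 'if last_name:'
        | none => mangled
      else mangled

-- ===== PORT B =====
-- Source B's inner 'while q < n and mangled[q].isdigit(): q += 1' (q moves over the fixed string)
def pvDigEnd (s : List Char) (q : Nat) : Nat :=
  if h : q < s.length then
    if (s[q]'h).isDigit then pvDigEnd s (q + 1) else q
  else q
termination_by s.length - q

-- int(mangled[p:q]) over an all-digit span — same exact decimal evaluation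
def pvDecVal (l : List Char) : Nat := l.foldl (fun a c => 10 * a + (c.toNat - 48)) 0

theorem pvDigEnd_ge (s : List Char) (q : Nat) : q ≤ pvDigEnd s q := by
  fun_induction pvDigEnd s q <;> omega

-- Source B's outer while loop: positions p → q + length over the fixed string, appending each segment
def pvCollect (s : List Char) (p : Nat) : List (List Char) :=
  if hp : p < s.length then
    if (s[p]'hp) = 'E' then []
    else
      if hq : pvDigEnd s p = p then []
      else
        if s.length < pvDigEnd s p + pvDecVal ((s.drop p).take (pvDigEnd s p - p)) then []
        else ((s.drop (pvDigEnd s p)).take (pvDecVal ((s.drop p).take (pvDigEnd s p - p))))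
              :: pvCollect s (pvDigEnd s p + pvDecVal ((s.drop p).take (pvDigEnd s p - p)))
  else []
termination_by s.length - p
decreasing_by have := pvDigEnd_ge s p; omega

def extract_short_name_alt (mangled : String) : String :=
  if ¬ PySem.Str.startswith mangled "_Z" then mangled
  else
    let names : List (List Char) :=
      if PySem.Str.startswith mangled "_ZN" then pvCollect mangled.toList 3 else []
    if PySem.Str.startswith mangled "_ZN3app8lua_bind" ∧ names.length ≥ 3 then
      String.ofList ((names.drop 2).headD [])   -- names[2]
    else
      match names.getLast? with
      | some nm => if nm ≠ [] then String.ofList nm else mangled   -- 'if names and names[-1]:'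
      | none => mangled

-- ===== PRECONDITION & SPEC =====
def Spec_extract_short_name (mangled : String) (out : String) : Prop := out = extract_short_name_alt mangled
instance (mangled : String) (out : String) : Decidable (Spec_extract_short_name mangled out) := by unfold Spec_extract_short_name; infer_instance

-- ===== CLAIM (what is proved, stated in full; the proofs are below) =====
def Claim_equal_extract_short_name : Prop := ∀ (mangled : String), Dom_extract_short_name mangled → Spec_extract_short_name mangled (extract_short_name mangled)

-- ===== LEMMAS AND PROOFS =====

-- proof-side abstraction: the segment list as a recursion over the suffix (links both ports)
def pvSegs (rest : List Char) : List (List Char) :=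
  match h : rest with
  | [] => []
  | c :: _ =>
    if c = 'E' then []
    else if pvCountDigits rest = 0 then []
    else if (pvName rest).length < pvDigitsVal (rest.take (pvCountDigits rest)) then []
    else pvName rest :: pvSegs (rest.drop (pvCountDigits rest + pvDigitsVal (rest.take (pvCountDigits rest))))
termination_by rest.length
decreasing_by subst h; simp [List.length_drop]; omega

theorem pvCountDigits_le_length (l : List Char) : pvCountDigits l ≤ l.length := by
  induction l with
  | nil => simp [pvCountDigits]
  | cons c cs ih => by_cases h : c.isDigit <;> simp [pvCountDigits, h] <;> omega

theorem pvDigEnd_eq (s : List Char) (q : Nat) :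
    pvDigEnd s q = q + pvCountDigits (s.drop q) := by
  fun_induction pvDigEnd s q with
  | case1 q h hd ih =>
    rw [ih, List.drop_eq_getElem_cons h, pvCountDigits]
    simp [hd]; omega
  | case2 q h hd =>
    rw [List.drop_eq_getElem_cons h, pvCountDigits]
    simp [hd]
  | case3 q h =>
    rw [List.drop_eq_nil_of_le (by omega)]
    simp [pvCountDigits]

-- B's index-based collector computes the same segment list as the suffix recursion
theorem pvCollect_eq_segs (s : List Char) (p : Nat) :
    pvCollect s p = pvSegs (s.drop p) := by
  fun_induction pvCollect s p with
  | case1 p hp hE =>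
    rw [List.drop_eq_getElem_cons hp, pvSegs]
    simp [hE]
  | case2 p hp hE hq =>
    have hc : pvCountDigits (s.drop p) = 0 := by
      have := pvDigEnd_eq s p; omega
    rw [List.drop_eq_getElem_cons hp, pvSegs]
    rw [← List.drop_eq_getElem_cons hp]
    simp [hE, hc]
  | case3 p hp hE hq hbig =>
    have hde := pvDigEnd_eq s p
    have hcd : pvDigEnd s p - p = pvCountDigits (s.drop p) := by omega
    have hcl := pvCountDigits_le_length (s.drop p)
    have hrl : (s.drop p).length = s.length - p := by simp
    have hlen : pvDecVal ((s.drop p).take (pvDigEnd s p - p))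
        = pvDigitsVal ((s.drop p).take (pvCountDigits (s.drop p))) := by rw [hcd]; rfl
    have hname : (pvName (s.drop p)).length
        = min (pvDigitsVal ((s.drop p).take (pvCountDigits (s.drop p)))) (s.length - (p + pvCountDigits (s.drop p))) := by
      simp [pvName]
    have hsh : (pvName (s.drop p)).length < pvDigitsVal ((s.drop p).take (pvCountDigits (s.drop p))) := by
      rw [hname]; rw [hlen] at hbig; omega
    rw [List.drop_eq_getElem_cons hp, pvSegs]
    rw [← List.drop_eq_getElem_cons hp]
    rw [if_neg hE, if_neg (show ¬ pvCountDigits (s.drop p) = 0 by omega), if_pos hsh]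
  | case4 p hp hE hq hbig ih =>
    have hde := pvDigEnd_eq s p
    have hcd : pvDigEnd s p - p = pvCountDigits (s.drop p) := by omega
    have hcl := pvCountDigits_le_length (s.drop p)
    have hrl : (s.drop p).length = s.length - p := by simp
    have hlen : pvDecVal ((s.drop p).take (pvDigEnd s p - p))
        = pvDigitsVal ((s.drop p).take (pvCountDigits (s.drop p))) := by rw [hcd]; rfl
    have hname : (pvName (s.drop p)).length
        = min (pvDigitsVal ((s.drop p).take (pvCountDigits (s.drop p)))) (s.length - (p + pvCountDigits (s.drop p))) := by
      simp [pvName]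
    have hnsh : ¬ (pvName (s.drop p)).length < pvDigitsVal ((s.drop p).take (pvCountDigits (s.drop p))) := by
      rw [hname]; rw [hlen] at hbig; omega
    have hseg : pvName (s.drop p) = (s.drop (pvDigEnd s p)).take (pvDecVal ((s.drop p).take (pvDigEnd s p - p))) := by
      rw [pvName, hlen, List.drop_drop]
      congr 1; rw [hde]
    have hrec : (s.drop p).drop (pvCountDigits (s.drop p) + pvDigitsVal ((s.drop p).take (pvCountDigits (s.drop p))))
        = s.drop (pvDigEnd s p + pvDecVal ((s.drop p).take (pvDigEnd s p - p))) := by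
      rw [List.drop_drop, hlen]; congr 1; omega
    rw [List.drop_eq_getElem_cons hp, pvSegs]
    rw [← List.drop_eq_getElem_cons hp]
    rw [if_neg hE, if_neg (show ¬ pvCountDigits (s.drop p) = 0 by omega), if_neg hnsh,
       hrec, hseg, ih]
  | case5 p hp => rw [List.drop_eq_nil_of_le (by omega), pvSegs]

theorem getLast?_cons_or (a : List Char) (l : List (List Char)) (last : Option (List Char)) :
    ((a :: l).getLast?).or last = (l.getLast?).or (some a) := by
  cases l <;> simp [List.getLast?_cons]

-- A's while loop returns the last segment of the parsed list (or the carried last_name)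
theorem pvAloop_eq_segs (rest : List Char) (last : Option (List Char)) :
    pvAloop rest last = ((pvSegs rest).getLast?).or last := by
  fun_induction pvAloop rest last
  case case1 => simp [pvSegs]
  case case5 last_name c t hE hi hlen ih =>
    rw [pvSegs]; simp only [if_neg hE, if_neg hi, if_neg hlen, ih]
    rw [getLast?_cons_or]
  all_goals rw [pvSegs]; simp_all

theorem countDigits_pos_isDigit (c : Char) (cs : List Char)
    (h : pvCountDigits (c :: cs) ≠ 0) : c.isDigit := by
  by_contra hc; simp [pvCountDigits, hc] at h

theorem pvName_length_le (rest : List Char) :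
    (pvName rest).length ≤ pvDigitsVal (rest.take (pvCountDigits rest)) := by
  simp [pvName]

-- A's lua_bind one-shot parse is the head of the parsed segment list
theorem pvAluaParse_eq_head (rest : List Char) :
    pvAluaParse rest = (pvSegs rest).head? := by
  cases rest with
  | nil => simp [pvAluaParse, pvSegs, pvCountDigits]
  | cons c t =>
    by_cases hi : pvCountDigits (c :: t) = 0
    · rw [pvSegs]; simp [pvAluaParse, hi]
    · have hd := countDigits_pos_isDigit c t hi
      have hE : c ≠ 'E' := by rintro rfl; simp [Char.isDigit] at hd
      rw [pvSegs]; simp only [if_neg hE, if_neg hi]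
      by_cases hl : (pvName (c :: t)).length < pvDigitsVal ((c :: t).take (pvCountDigits (c :: t)))
      · simp [pvAluaParse, Nat.pos_of_ne_zero hi, hl, Nat.ne_of_lt hl]
      · have heq : (pvName (c :: t)).length = pvDigitsVal ((c :: t).take (pvCountDigits (c :: t))) :=
          Nat.le_antisymm (pvName_length_le _) (Nat.not_lt.mp hl)
        simp [pvAluaParse, Nat.pos_of_ne_zero hi, heq]

-- unfolding pvSegs over the two segments of the lua_bind prefix
theorem pvSegs_lua (t : List Char) :
    pvSegs ('3' :: 'a' :: 'p' :: 'p' :: '8' :: 'l' :: 'u' :: 'a' :: '_' :: 'b' :: 'i' :: 'n' :: 'd' :: t)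
      = ['a','p','p'] :: ['l','u','a','_','b','i','n','d'] :: pvSegs t := by
  have c1 : pvCountDigits ('3'::'a'::'p'::'p'::'8'::'l'::'u'::'a'::'_'::'b'::'i'::'n'::'d'::t) = 1 := by
    simp [pvCountDigits, show '3'.isDigit = true from by decide, show 'a'.isDigit = false from by decide]
  have c2 : pvCountDigits ('8'::'l'::'u'::'a'::'_'::'b'::'i'::'n'::'d'::t) = 1 := by
    simp [pvCountDigits, show '8'.isDigit = true from by decide, show 'l'.isDigit = false from by decide]
  have v3 : pvDigitsVal ['3'] = 3 := by decide
  have v8 : pvDigitsVal ['8'] = 8 := by decide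
  have n1 : pvName ('3'::'a'::'p'::'p'::'8'::'l'::'u'::'a'::'_'::'b'::'i'::'n'::'d'::t) = ['a','p','p'] := by
    rw [pvName, c1, show List.take 1 ('3'::'a'::'p'::'p'::'8'::'l'::'u'::'a'::'_'::'b'::'i'::'n'::'d'::t) = ['3'] from rfl, v3]
    rfl
  have n2 : pvName ('8'::'l'::'u'::'a'::'_'::'b'::'i'::'n'::'d'::t) = ['l','u','a','_','b','i','n','d'] := by
    rw [pvName, c2, show List.take 1 ('8'::'l'::'u'::'a'::'_'::'b'::'i'::'n'::'d'::t) = ['8'] from rfl, v8]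
    rfl
  conv_lhs => rw [pvSegs.eq_def]
  simp only [c1, n1, v3, show List.take 1 ('3'::'a'::'p'::'p'::'8'::'l'::'u'::'a'::'_'::'b'::'i'::'n'::'d'::t) = ['3'] from rfl]
  norm_num
  conv_lhs => rw [pvSegs.eq_def]
  simp only [c2, n2, v8, show List.take 1 ('8'::'l'::'u'::'a'::'_'::'b'::'i'::'n'::'d'::t) = ['8'] from rfl]
  norm_num
  simp [show ('3':Char) ≠ 'E' from by decide, show ('8':Char) ≠ 'E' from by decide]

-- ===== VERDICT (by name: the statement is the Claim_ definition above) =====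
theorem extract_short_name_spec : Claim_equal_extract_short_name := by
  intro mangled _
  unfold Spec_extract_short_name extract_short_name extract_short_name_alt
  simp only [PySem.Str.startswith_eq, pvCollect_eq_segs]
  by_cases h1 : PySem.Chars.startswith mangled.toList ['_','Z'] = true
  case neg => simp [h1]
  by_cases h3 : PySem.Chars.startswith mangled.toList ['_','Z','N'] = true
  case neg =>
    have hp : ¬ PySem.Chars.startswith mangled.toList ['_','Z','N','3','a','p','p','8','l','u','a','_','b','i','n','d'] = true := by
      intro hpp
      exact h3 ((PySem.Chars.startswith_iff _ _).mpr
        (List.IsPrefix.trans (by decide) ((PySem.Chars.startswith_iff _ _).mp hpp)))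
    simp [h1, h3, hp]
  by_cases hp : PySem.Chars.startswith mangled.toList ['_','Z','N','3','a','p','p','8','l','u','a','_','b','i','n','d'] = true
  case neg =>
    simp only [pvAloop_eq_segs]
    cases hseg : (pvSegs (mangled.toList.drop 3)).getLast? <;> simp [hseg, h1, h3, hp]
  obtain ⟨t, ht⟩ := (PySem.Chars.startswith_iff mangled.toList _).mp hp
  have hd16 : mangled.toList.drop 16 = t := by rw [← ht]; rfl
  have hd3 : mangled.toList.drop 3 = '3'::'a'::'p'::'p'::'8'::'l'::'u'::'a'::'_'::'b'::'i'::'n'::'d'::t := by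
    rw [← ht]; rfl
  simp only [hd16, hd3, pvSegs_lua, pvAluaParse_eq_head, pvAloop_eq_segs]
  cases pvSegs t with
  | nil => simp [h1, h3, hp]
  | cons n l => simp [h1, h3, hp]
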